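-- pv_equiv track=rewrite | github.com/umairansar/neetcode-submissions | Data Structures & Algorithms/n-queens/submission-2.py | noCollision
-- ===== SOURCE A (Python) =====
-- from typing import List, Tuple
--
-- def noCollision(i:int, j:int, occupied_blocks : List[Tuple[int, int]]) -> bool:
--     if (i, j) in occupied_blocks:
--         return False
--
--     for (x, y) in occupied_blocks:
--         k1 = abs(i - x)
--         k2 = abs(j - y)
--
--         #up down case
--         if (k1 > 0 and k2 == 0) or (k1 ==  0 and k2 > 0):
--             return False
--
--         #diagonal case
--         if (k1 == k2):
--             return False
--
--     return True
-- ===== SOURCE B (Python) =====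
-- from typing import List, Tuple
--
-- def noCollision(i:int, j:int, occupied_blocks : List[Tuple[int, int]]) -> bool:
--     rows = {x for (x, y) in occupied_blocks}
--     cols = {y for (x, y) in occupied_blocks}
--     diffs = {x - y for (x, y) in occupied_blocks}
--     sums = {x + y for (x, y) in occupied_blocks}
--     return i not in rows and j not in cols and (i - j) not in diffs and (i + j) not in sums
-- ===== Notes on version B (the rewrite author's own statement) =====
-- stated objective: simpler
-- what changed: Replaces the per-element branchy scan with |i-x|/|j-y| arithmetic (plus the redundant (i,j)-membership pre-check) by building four attack tables (rows, cols, diagonals x-y, anti-diagonals x+y) and answering with four membership tests, using abs(i-x)==abs(j-y) iff i-j==x-y or i+j==x+y.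
import Mathlib
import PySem

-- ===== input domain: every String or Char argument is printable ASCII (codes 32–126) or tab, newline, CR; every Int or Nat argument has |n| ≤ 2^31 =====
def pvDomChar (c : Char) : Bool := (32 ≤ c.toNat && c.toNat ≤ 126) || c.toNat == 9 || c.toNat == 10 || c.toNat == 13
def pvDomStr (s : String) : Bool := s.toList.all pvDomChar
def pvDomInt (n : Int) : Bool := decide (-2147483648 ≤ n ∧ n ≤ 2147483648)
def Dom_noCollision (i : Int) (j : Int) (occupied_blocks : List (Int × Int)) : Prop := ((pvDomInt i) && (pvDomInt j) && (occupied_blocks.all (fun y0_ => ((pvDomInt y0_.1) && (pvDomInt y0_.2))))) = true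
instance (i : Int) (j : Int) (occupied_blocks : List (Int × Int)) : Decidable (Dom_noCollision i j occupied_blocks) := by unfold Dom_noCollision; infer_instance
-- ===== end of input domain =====

-- B builds the four attack tables (rows, cols, diagonals x-y, anti-diagonals x+y) once and
-- answers with four membership tests; simpler than A's per-element branchy abs scan.

-- ===== PORT A =====
-- the for-loop with its early returns, step for step
def noCollisionLoop (i : Int) (j : Int) : List (Int × Int) → Bool
  | [] => true
  | (x, y) :: rest =>
    let k1 := |i - x|
    let k2 := |j - y|
    if (k1 > 0 ∧ k2 = 0) ∨ (k1 = 0 ∧ k2 > 0) then false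
    else if k1 = k2 then false
    else noCollisionLoop i j rest

def noCollision (i : Int) (j : Int) (occupied_blocks : List (Int × Int)) : Bool :=
  if occupied_blocks.contains (i, j) then false
  else noCollisionLoop i j occupied_blocks

-- ===== PORT B =====
def noCollision_alt (i : Int) (j : Int) (occupied_blocks : List (Int × Int)) : Bool :=
  let rows : PySem.Set Int := PySem.Set.ofList (occupied_blocks.map (fun p => p.1))
  let cols : PySem.Set Int := PySem.Set.ofList (occupied_blocks.map (fun p => p.2))
  let diffs : PySem.Set Int := PySem.Set.ofList (occupied_blocks.map (fun p => p.1 - p.2))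
  let sums : PySem.Set Int := PySem.Set.ofList (occupied_blocks.map (fun p => p.1 + p.2))
  !(PySem.Set.contains rows i) && !(PySem.Set.contains cols j) &&
  !(PySem.Set.contains diffs (i - j)) && !(PySem.Set.contains sums (i + j))

-- ===== PRECONDITION & SPEC =====
def Spec_noCollision (i : Int) (j : Int) (occupied_blocks : List (Int × Int)) (out : Bool) : Prop := out = noCollision_alt i j occupied_blocks
instance (i : Int) (j : Int) (occupied_blocks : List (Int × Int)) (out : Bool) : Decidable (Spec_noCollision i j occupied_blocks out) := by unfold Spec_noCollision; infer_instance

-- ===== CLAIM (what is proved, stated in full; the proofs are below) =====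
def Claim_equal_noCollision : Prop := ∀ (i : Int) (j : Int) (occupied_blocks : List (Int × Int)), Dom_noCollision i j occupied_blocks → Spec_noCollision i j occupied_blocks (noCollision i j occupied_blocks)

-- ===== LEMMAS AND PROOFS =====

-- A's per-element branch condition, as one proposition
def hitA (i j x y : Int) : Prop :=
  (|i - x| > 0 ∧ |j - y| = 0) ∨ (|i - x| = 0 ∧ |j - y| > 0) ∨ |i - x| = |j - y|

theorem hitA_iff (i j x y : Int) :
    hitA i j x y ↔ (x = i ∨ y = j ∨ x - y = i - j ∨ x + y = i + j) := by
  unfold hitA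
  rcases abs_cases (i - x) with ⟨e1, _⟩ | ⟨e1, _⟩ <;>
    rcases abs_cases (j - y) with ⟨e2, _⟩ | ⟨e2, _⟩ <;> rw [e1, e2] <;> omega

-- A's loop returns true iff no occupied block fires any of its branches
theorem noCollisionLoop_iff (i j : Int) (l : List (Int × Int)) :
    noCollisionLoop i j l = true ↔ ∀ p ∈ l, ¬ hitA i j p.1 p.2 := by
  induction l with
  | nil => simp [noCollisionLoop]
  | cons hd tl ih =>
    obtain ⟨x, y⟩ := hd
    simp only [noCollisionLoop]
    split_ifs with h1 h2
    · simp only [false_iff, not_forall]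
      exact ⟨(x, y), List.mem_cons_self, not_not_intro (h1.elim Or.inl (Or.inr ∘ Or.inl))⟩
    · simp only [false_iff, not_forall]
      exact ⟨(x, y), List.mem_cons_self, not_not_intro (Or.inr (Or.inr h2))⟩
    · rw [ih]
      constructor
      · intro h p hp
        rcases List.mem_cons.mp hp with rfl | hp'
        · rintro (hc | hc | hc)
          · exact h1 (Or.inl hc)
          · exact h1 (Or.inr hc)
          · exact h2 hc
        · exact h p hp'
      · exact fun h p hp => h p (List.mem_cons_of_mem _ hp)

theorem noCollision_alt_iff (i j : Int) (l : List (Int × Int)) :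
    noCollision_alt i j l = true ↔
      ∀ p ∈ l, ¬(p.1 = i ∨ p.2 = j ∨ p.1 - p.2 = i - j ∨ p.1 + p.2 = i + j) := by
  simp only [noCollision_alt, Bool.and_eq_true, Bool.not_eq_true', ← Bool.not_eq_true,
    PySem.Set.contains, List.elem_iff, PySem.Set.mem_ofList, List.mem_map]
  constructor
  · rintro ⟨⟨⟨hr, hc⟩, hd⟩, hs⟩ p hp hbad
    rcases hbad with h | h | h | h
    · exact hr ⟨p, hp, h⟩
    · exact hc ⟨p, hp, h⟩
    · exact hd ⟨p, hp, h⟩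
    · exact hs ⟨p, hp, h⟩
  · intro h
    refine ⟨⟨⟨?_, ?_⟩, ?_⟩, ?_⟩ <;>
      rintro ⟨p, hp, he⟩ <;> exact h p hp (by tauto)

-- ===== VERDICT (by name: the statement is the Claim_ definition above) =====
theorem noCollision_spec : Claim_equal_noCollision := by
  intro i j occ _
  unfold Spec_noCollision noCollision
  split_ifs with hmem
  · have hm : (i, j) ∈ occ := by simpa using hmem
    symm
    rw [Bool.eq_false_iff, ne_eq, noCollision_alt_iff]
    intro h
    exact h (i, j) hm (by simp)
  · rw [Bool.eq_iff_iff, noCollisionLoop_iff, noCollision_alt_iff]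
    exact forall_congr' fun p => forall_congr' fun hp => not_congr (hitA_iff i j p.1 p.2)
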